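-- pv_equiv track=rewrite | github.com/slden26/RenLocalizer-UA | src/utils/unren_manager.py | _parse_major_version
-- ===== SOURCE A (Python) =====
-- from typing import Callable, Optional
--
-- def _parse_major_version(version_text: str) -> Optional[int]:
--     digits = "".join(ch if ch.isdigit() or ch == "." else " " for ch in version_text)
--     parts = [p for p in digits.split() if p]
--     if not parts:
--         return None
--     try:
--         return int(parts[0].split(".")[0])
--     except ValueError:
--         return None
-- ===== SOURCE B (Python) =====
-- def _parse_major_version(version_text):
--     n = len(version_text)
--     i = 0
--     while i < n and not version_text[i].isdigit():
--         i += 1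
--     if i == n:
--         return None
--     j = i
--     while j < n and version_text[j].isdigit():
--         j += 1
--     return int(version_text[i:j])
-- ===== Notes on version B (the rewrite author's own statement) =====
-- stated objective: simpler
-- what changed: Replaces A's whole-string rewrite (join of per-char substitution), whitespace split, list filter and second split by a single scan that finds the first digit and converts its run of consecutive digits; Pre_ excludes strings whose first digit-or-dot character is a dot while a digit occurs later, where A's None (a ValueError on the empty prefix before the dot) and B's first digit run are both defensible readings of a malformed version token.
-- outside the precondition, e.g. on _parse_major_version('v.1'): A returns None, B returns 1
import Mathlib
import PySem

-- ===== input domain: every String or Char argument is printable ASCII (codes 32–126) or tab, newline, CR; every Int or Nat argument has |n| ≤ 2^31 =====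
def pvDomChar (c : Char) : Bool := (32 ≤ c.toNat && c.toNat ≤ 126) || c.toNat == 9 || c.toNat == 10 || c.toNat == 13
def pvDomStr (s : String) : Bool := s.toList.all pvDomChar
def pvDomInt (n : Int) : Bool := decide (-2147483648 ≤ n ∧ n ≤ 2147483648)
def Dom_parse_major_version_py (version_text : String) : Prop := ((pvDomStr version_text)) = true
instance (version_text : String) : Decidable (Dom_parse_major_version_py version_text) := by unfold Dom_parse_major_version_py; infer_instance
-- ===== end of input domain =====

-- B replaces A's whole-string rewrite + split + filter + re-split pipeline by a single scan for the first run of digits (objective: simpler).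

-- ===== PORT A =====
-- "".join(ch if ch.isdigit() or ch == "." else " " for ch in version_text); split(); filter truthy; int(parts[0].split(".")[0]) with ValueError → None
def parse_major_version_py (version_text : String) : Option Int :=
  let digits := version_text.toList.map (fun ch => if PySem.Chars.isdigit ch || ch == '.' then ch else ' ')
  let parts := (PySem.Chars.split₀ digits).filter (fun p => !p.isEmpty)
  match parts with
  | [] => none
  | p :: _ => PySem.Int.ofChars? ((PySem.Chars.splitOn p ['.']).headD [])

-- ===== PORT B =====
-- Source B's scan: advance past non-digits; at the first digit take its run of consecutive digits and convert it; none if no digit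
def altScan : List Char → Option Int
  | [] => none
  | c :: cs =>
    if PySem.Chars.isdigit c then PySem.Int.ofChars? (c :: cs.takeWhile PySem.Chars.isdigit)
    else altScan cs

def parse_major_version_py_alt (version_text : String) : Option Int :=
  altScan version_text.toList

-- ===== PRECONDITION & SPEC =====
-- token characters of A's first pass: kept as-is; everything else becomes a space
def pvTok (c : Char) : Bool := PySem.Chars.isdigit c || c == '.'

-- Pre_ excludes strings whose first digit-or-dot character is a dot while a digit occurs later: there A's
-- pipeline yields None (a ValueError on the empty prefix before the dot) while B reads the first digit
-- run — a malformed-version corner where either value is defensible.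
def Pre_parse_major_version_py (version_text : String) : Prop :=
  ¬ ((version_text.toList.dropWhile (fun c => !pvTok c)).head? = some '.'
      ∧ version_text.toList.any PySem.Chars.isdigit = true)
instance (version_text : String) : Decidable (Pre_parse_major_version_py version_text) := by
  unfold Pre_parse_major_version_py; infer_instance

def pvWitness_parse_major_version_py : String := "7.4.11"

def Spec_parse_major_version_py (version_text : String) (out : Option Int) : Prop := out = parse_major_version_py_alt version_text
instance (version_text : String) (out : Option Int) : Decidable (Spec_parse_major_version_py version_text out) := by unfold Spec_parse_major_version_py; infer_instance

-- ===== CLAIM (what is proved, stated in full; the proofs are below) =====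
def Claim_equal_parse_major_version_py : Prop := ∀ (version_text : String), Dom_parse_major_version_py version_text → Pre_parse_major_version_py version_text → Spec_parse_major_version_py version_text (parse_major_version_py version_text)

-- ===== LEMMAS AND PROOFS =====

theorem pv_isPrefixOf_dot (c : Char) (rest : List Char) :
    (['.'] : List Char).isPrefixOf (c :: rest) = ('.' == c) := by
  simp [List.isPrefixOf]

theorem pv_go_acc (l : List Char) : ∀ cur acc, ∃ ps, PySem.Chars.split₀.go l cur acc = acc.reverse ++ ps := by
  induction l with
  | nil =>
    intro cur acc
    by_cases h : cur.isEmpty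
    · exact ⟨[], by simp [PySem.Chars.split₀.go, h]⟩
    · exact ⟨[cur.reverse], by simp [PySem.Chars.split₀.go, h]⟩
  | cons c l ih =>
    intro cur acc
    by_cases hs : PySem.Chars.isspace c
    · by_cases h : cur.isEmpty
      · obtain ⟨ps, hps⟩ := ih [] acc
        exact ⟨ps, by simp [PySem.Chars.split₀.go, hs, h, hps]⟩
      · obtain ⟨ps, hps⟩ := ih [] (cur.reverse :: acc)
        exact ⟨cur.reverse :: ps, by simp [PySem.Chars.split₀.go, hs, h, hps]⟩
    · obtain ⟨ps, hps⟩ := ih (c :: cur) acc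
      exact ⟨ps, by simp [PySem.Chars.split₀.go, hs, hps]⟩

theorem pv_go_first (l : List Char) : ∀ cur acc, (∀ c ∈ l, PySem.Chars.isspace c = !pvTok c) → cur ≠ [] →
    ∃ ps, PySem.Chars.split₀.go l cur acc = acc.reverse ++ (cur.reverse ++ l.takeWhile pvTok) :: ps := by
  induction l with
  | nil =>
    intro cur acc _ hcur
    refine ⟨[], ?_⟩
    simp [PySem.Chars.split₀.go, List.isEmpty_iff, hcur]
  | cons c l ih =>
    intro cur acc hl hcur
    by_cases ht : pvTok c
    · have hs : PySem.Chars.isspace c = false := by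
        have := hl c (by simp); simp [ht] at this; exact this
      obtain ⟨ps, hps⟩ := ih (c :: cur) acc (fun x hx => hl x (by simp [hx])) (by simp)
      refine ⟨ps, ?_⟩
      simp [PySem.Chars.split₀.go, hs, hps, ht]
    · have hs : PySem.Chars.isspace c = true := by
        have := hl c (by simp); simp [ht] at this; exact this
      obtain ⟨ps, hps⟩ := pv_go_acc l [] (cur.reverse :: acc)
      refine ⟨ps, ?_⟩
      simp [PySem.Chars.split₀.go, hs, List.isEmpty_iff, hcur, hps, ht]

theorem pv_splitOn_go_acc (fuel : Nat) : ∀ (l cur acc : List Char) (accs : List (List Char)),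
    ∃ ps, PySem.Chars.splitOn.go ['.'] fuel l cur accs = accs.reverse ++ ps := by
  induction fuel with
  | zero => intro l cur acc accs; exact ⟨[cur.reverse ++ l], by simp [PySem.Chars.splitOn.go]⟩
  | succ fuel ih =>
    intro l cur acc accs
    match l with
    | [] => exact ⟨[cur.reverse], by simp [PySem.Chars.splitOn.go]⟩
    | c :: rest =>
      by_cases h : (['.'] : List Char).isPrefixOf (c :: rest)
      · obtain ⟨ps, hps⟩ := ih (List.drop 1 (c :: rest)) [] acc (cur.reverse :: accs)
        simp only [List.drop_succ_cons, List.drop_zero] at hps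
        exact ⟨cur.reverse :: ps, by simp [PySem.Chars.splitOn.go, h, hps]⟩
      · obtain ⟨ps, hps⟩ := ih rest (c :: cur) acc accs
        exact ⟨ps, by simp [PySem.Chars.splitOn.go, h, hps]⟩

theorem pv_splitOn_go_head (fuel : Nat) : ∀ (l cur : List Char) (accs : List (List Char)), l.length < fuel →
    ∃ ps, PySem.Chars.splitOn.go ['.'] fuel l cur accs
      = accs.reverse ++ (cur.reverse ++ l.takeWhile (fun c => !(c == '.'))) :: ps := by
  induction fuel with
  | zero => intro l cur accs h; omega
  | succ fuel ih =>
    intro l cur accs hlen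
    match l with
    | [] => exact ⟨[], by simp [PySem.Chars.splitOn.go]⟩
    | c :: rest =>
      by_cases h : (['.'] : List Char).isPrefixOf (c :: rest)
      · have hc : c = '.' := by
          rw [pv_isPrefixOf_dot] at h; exact (beq_iff_eq.mp h).symm
        obtain ⟨ps, hps⟩ := pv_splitOn_go_acc fuel (List.drop 1 (c :: rest)) [] [] (cur.reverse :: accs)
        simp only [List.drop_succ_cons, List.drop_zero] at hps
        refine ⟨ps, ?_⟩
        simp [PySem.Chars.splitOn.go, h, hps, hc]
      · have hc : ¬ (c = '.') := by
          rw [pv_isPrefixOf_dot] at h; exact fun e => h (beq_iff_eq.mpr e.symm)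
        obtain ⟨ps, hps⟩ := ih rest (c :: cur) accs (by simpa using Nat.lt_of_succ_lt_succ hlen)
        refine ⟨ps, ?_⟩
        simp [PySem.Chars.splitOn.go, h, hps, List.takeWhile_cons, hc]

-- split(".")[0] is the prefix before the first dot
theorem pv_splitOn_head (p : List Char) :
    (PySem.Chars.splitOn p ['.']).headD [] = p.takeWhile (fun c => !(c == '.')) := by
  obtain ⟨ps, hps⟩ := pv_splitOn_go_head (p.length + 1) p [] [] (by omega)
  simp [PySem.Chars.splitOn, hps]

theorem pv_tok_not_space (c : Char) (h : pvTok c = true) : PySem.Chars.isspace c = false := by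
  simp [pvTok, PySem.Chars.isdigit] at h
  rcases h with ⟨h1, h2⟩ | h
  · have n1 : 48 ≤ c.toNat := h1
    have n2 : c.toNat ≤ 57 := h2
    simp [PySem.Chars.isspace]
    omega
  · subst h; decide

theorem pv_takeWhile_map (l : List Char) :
    (l.map (fun ch => if pvTok ch then ch else ' ')).takeWhile pvTok = l.takeWhile pvTok := by
  induction l with
  | nil => rfl
  | cons c l ih =>
    by_cases h : pvTok c
    · simp [List.takeWhile_cons, h, ih]
    · simp [List.takeWhile_cons, h]
      decide

theorem pv_takeWhile_digits (l : List Char) :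
    (l.takeWhile pvTok).takeWhile (fun c => !(c == '.')) = l.takeWhile PySem.Chars.isdigit := by
  induction l with
  | nil => rfl
  | cons c l ih =>
    by_cases hd : PySem.Chars.isdigit c
    · have ht : pvTok c = true := by simp [pvTok, hd]
      have hne : ¬ (c = '.') := by
        intro e; subst e; exact absurd hd (by decide)
      simp [ht, hd, hne, ih]
    · by_cases hdot : c = '.'
      · subst hdot
        simp [pvTok, show PySem.Chars.isdigit '.' = false from by decide]
      · have ht : pvTok c = false := by simp [pvTok, hd, hdot]
        simp [ht, hd]

theorem pv_map_space (l : List Char) :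
    ∀ c ∈ l.map (fun ch => if pvTok ch then ch else ' '), PySem.Chars.isspace c = !pvTok c := by
  intro c hc
  simp only [List.mem_map] at hc
  obtain ⟨x, _, hx⟩ := hc
  by_cases h : pvTok x
  · rw [if_pos h] at hx; subst hx; simp [pv_tok_not_space x h, h]
  · rw [if_neg h] at hx; subst hx; decide

theorem pv_altScan_none (l : List Char) (h : l.any PySem.Chars.isdigit = false) : altScan l = none := by
  induction l with
  | nil => rfl
  | cons c l ih =>
    simp only [List.any_cons, Bool.or_eq_false_iff] at h
    simp [altScan, h.1, ih h.2]

theorem pv_main (l : List Char) :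
    ¬ ((l.dropWhile (fun c => !pvTok c)).head? = some '.' ∧ l.any PySem.Chars.isdigit = true) →
    (match (PySem.Chars.split₀ (l.map (fun ch => if pvTok ch then ch else ' '))).filter (fun p => !p.isEmpty) with
      | [] => none
      | p :: _ => PySem.Int.ofChars? ((PySem.Chars.splitOn p ['.']).headD [])) = altScan l := by
  induction l with
  | nil => intro _; rfl
  | cons c l ih =>
    intro hpre
    by_cases ht : pvTok c
    · -- first token char found: the first part is c :: takeWhile pvTok l
      obtain ⟨ps, hps⟩ := pv_go_first (l.map (fun ch => if pvTok ch then ch else ' ')) [c] []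
        (pv_map_space l) (by simp)
      have hsplit : PySem.Chars.split₀ ((c :: l).map (fun ch => if pvTok ch then ch else ' '))
          = (c :: l.takeWhile pvTok) :: ps := by
        have hs : PySem.Chars.isspace c = false := pv_tok_not_space c ht
        simp [PySem.Chars.split₀, ht, hs, PySem.Chars.split₀.go, hps, pv_takeWhile_map]
      rw [hsplit]
      have hfil : ((c :: l.takeWhile pvTok) :: ps).filter (fun p => !p.isEmpty)
          = (c :: l.takeWhile pvTok) :: ps.filter (fun p => !p.isEmpty) := by
        simp
      rw [hfil]
      simp only [pv_splitOn_head]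
      by_cases hd : PySem.Chars.isdigit c
      · have hne : ¬ (c = '.') := by
          intro e; subst e; exact absurd hd (by decide)
        simp [altScan, hd, hne, pv_takeWhile_digits]
      · have hdot : c = '.' := by
          simp [pvTok, hd] at ht; exact ht
        subst hdot
        -- excluded unless l has no digit; then B's scan also yields none
        have hdrop : (('.' :: l).dropWhile (fun c => !pvTok c)).head? = some '.' := by
          simp [show pvTok '.' = true from by decide]
        have hnod : l.any PySem.Chars.isdigit = false := by
          by_contra h
          rw [Bool.not_eq_false] at h
          exact hpre ⟨hdrop, by simp [List.any_cons, h]⟩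
        simp [altScan, show PySem.Chars.isdigit '.' = false from by decide,
          show PySem.Int.ofChars? ([] : List Char) = none from by decide,
          pv_altScan_none l hnod]
    · have hstep : PySem.Chars.split₀ ((c :: l).map (fun ch => if pvTok ch then ch else ' '))
          = PySem.Chars.split₀ (l.map (fun ch => if pvTok ch then ch else ' ')) := by
        simp [PySem.Chars.split₀, ht, PySem.Chars.split₀.go,
          show PySem.Chars.isspace ' ' = true from by decide]
      rw [hstep]
      have hd : PySem.Chars.isdigit c = false := by
        simp [pvTok] at ht; exact ht.1
      have hdot : ¬ (c = '.') := by
        simp [pvTok] at ht; exact ht.2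
      have hpre' : ¬ ((l.dropWhile (fun c => !pvTok c)).head? = some '.'
          ∧ l.any PySem.Chars.isdigit = true) := by
        intro ⟨h1, h2⟩
        exact hpre ⟨by simp [ht, h1], by simp [List.any_cons, h2]⟩
      simpa [altScan, hd, hdot] using ih hpre'

-- ===== VERDICT (by name: the statement is the Claim_ definition above) =====
theorem parse_major_version_py_spec : Claim_equal_parse_major_version_py := by
  intro s _ hpre
  unfold Spec_parse_major_version_py parse_major_version_py parse_major_version_py_alt
  unfold Pre_parse_major_version_py at hpre
  have := pv_main s.toList hpre
  simpa [pvTok] using this
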